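-- pv_equiv track=rewrite | github.com/BAder82t/bhdr-oss | bench.py | _pick_K_prime_split
-- ===== SOURCE A (Python) =====
-- def _pick_K_prime_split(K: int, n_slots: int) -> tuple[int, int, int]:
--     """Smallest K' >= K that is a power-of-2 divisor of n_slots; balanced r1*r2."""
--     K_prime = 1
--     while K_prime < K:
--         K_prime *= 2
--     if n_slots % K_prime != 0:
--         raise ValueError(f"K_prime={K_prime} does not divide n_slots={n_slots}")
--     r1 = 1
--     while r1 * r1 < K_prime:
--         r1 *= 2
--     r2 = K_prime // r1
--     return K_prime, r1, r2
-- ===== SOURCE B (Python) =====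
-- def _pick_K_prime_split(K: int, n_slots: int) -> tuple[int, int, int]:
--     """Smallest K' >= K that is a power-of-2 divisor of n_slots; balanced r1*r2."""
--     K_prime = 1 if K < 2 else 1 << (K - 1).bit_length()
--     if n_slots % K_prime != 0:
--         raise ValueError(f"K_prime={K_prime} does not divide n_slots={n_slots}")
--     m = K_prime.bit_length() - 1
--     r1 = 1 << ((m + 1) // 2)
--     r2 = K_prime // r1
--     return K_prime, r1, r2
-- ===== Notes on version B (the rewrite author's own statement) =====
-- stated objective: simpler
-- what changed: Replaced both doubling while-loops by closed-form bit arithmetic: K_prime = 1 << (K-1).bit_length() (1 for K < 2) and r1 = 1 << ((m+1)//2) with m = K_prime.bit_length() - 1; the divisibility ValueError check is kept identical and excluded by Pre_.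
import Mathlib
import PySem

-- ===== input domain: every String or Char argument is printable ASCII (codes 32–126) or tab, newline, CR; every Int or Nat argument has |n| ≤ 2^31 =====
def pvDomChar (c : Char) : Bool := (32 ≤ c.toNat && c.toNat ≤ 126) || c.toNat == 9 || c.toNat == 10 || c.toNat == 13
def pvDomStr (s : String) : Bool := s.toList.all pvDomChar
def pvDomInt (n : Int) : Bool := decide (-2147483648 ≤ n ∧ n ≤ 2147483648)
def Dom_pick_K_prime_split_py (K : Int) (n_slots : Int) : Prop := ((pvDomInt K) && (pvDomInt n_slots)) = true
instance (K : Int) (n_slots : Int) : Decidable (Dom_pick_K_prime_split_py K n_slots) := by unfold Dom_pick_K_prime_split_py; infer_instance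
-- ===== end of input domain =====

-- B replaces A's two doubling loops by closed-form bit arithmetic (bit_length and shifts); objective: simpler.

-- ===== PORT A =====
-- 'while K_prime < K: K_prime *= 2' — fuel 64 more than suffices on |K| ≤ 2^31 (proved below)
def pvLoopK : Nat → Int → Int → Int
  | 0, _, kp => kp
  | f + 1, K, kp => if kp < K then pvLoopK f K (2 * kp) else kp

-- 'while r1 * r1 < K_prime: r1 *= 2'
def pvLoopR : Nat → Int → Int → Int
  | 0, _, r1 => r1
  | f + 1, Kp, r1 => if r1 * r1 < Kp then pvLoopR f Kp (2 * r1) else r1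

def pick_K_prime_split_py (K : Int) (n_slots : Int) : Int × Int × Int :=
  let K_prime := pvLoopK 64 K 1
  -- 'if n_slots % K_prime != 0: raise ValueError(...)' — excluded by Pre_
  let r1 := pvLoopR 64 K_prime 1
  let r2 := PySem.Int.floordiv K_prime r1
  (K_prime, r1, r2)

-- ===== PORT B =====
def pick_K_prime_split_py_alt (K : Int) (n_slots : Int) : Int × Int × Int :=
  let K_prime : Int := if K < 2 then 1 else (1 : Int) <<< PySem.Int.bitLength (K - 1)
  -- 'if n_slots % K_prime != 0: raise ValueError(...)' — excluded by Pre_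
  let m : Nat := PySem.Int.bitLength K_prime - 1
  let r1 : Int := (1 : Int) <<< ((m + 1) / 2)
  let r2 : Int := PySem.Int.floordiv K_prime r1
  (K_prime, r1, r2)

-- ===== PRECONDITION & SPEC =====
-- Pre_ excludes exactly the inputs where A raises ValueError: n_slots not divisible by the
-- chosen power of two (closed form: 2^bit_length(K-1) for K ≥ 2, else 1).
def Pre_pick_K_prime_split_py (K : Int) (n_slots : Int) : Prop :=
  PySem.Int.mod n_slots (if K < 2 then 1 else (2 : Int) ^ PySem.Int.bitLength (K - 1)) = 0
instance (K : Int) (n_slots : Int) : Decidable (Pre_pick_K_prime_split_py K n_slots) := by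
  unfold Pre_pick_K_prime_split_py; infer_instance

def pvWitness_pick_K_prime_split_py : Int × Int := (3, 8)

def Spec_pick_K_prime_split_py (K : Int) (n_slots : Int) (out : Int × Int × Int) : Prop := out = pick_K_prime_split_py_alt K n_slots
instance (K : Int) (n_slots : Int) (out : Int × Int × Int) : Decidable (Spec_pick_K_prime_split_py K n_slots out) := by unfold Spec_pick_K_prime_split_py; infer_instance

-- ===== CLAIM (what is proved, stated in full; the proofs are below) =====
def Claim_equal_pick_K_prime_split_py : Prop := ∀ (K : Int) (n_slots : Int), Dom_pick_K_prime_split_py K n_slots → Pre_pick_K_prime_split_py K n_slots → Spec_pick_K_prime_split_py K n_slots (pick_K_prime_split_py K n_slots)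

-- ===== LEMMAS AND PROOFS =====

-- the exponent of the power of two both versions compute
def pvS (K : Int) : Nat := if K < 2 then 0 else PySem.Int.bitLength (K - 1)

lemma pvS_upper (K : Int) (hK : K ≤ 2147483648) : pvS K ≤ 32 := by
  unfold pvS
  split
  · omega
  · rename_i h
    by_contra hgt
    have h1 := PySem.Int.two_pow_bitLength_le (K - 1) (by omega)
    have h2 : (2 : Nat) ^ 32 ≤ 2 ^ (PySem.Int.bitLength (K - 1) - 1) :=
      Nat.pow_le_pow_right (by norm_num) (by omega)
    have h3 : (K - 1).natAbs = (K - 1).toNat := by omega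
    have : (2 : Nat) ^ 32 ≤ (K - 1).toNat := by omega
    norm_num at this
    omega

lemma pvS_ge (K : Int) : K ≤ (2 : Int) ^ pvS K := by
  unfold pvS
  split
  · simp; omega
  · rename_i h
    have h1 := PySem.Int.lt_two_pow_bitLength (K - 1)
    have h3 : (K - 1).natAbs = (K - 1).toNat := by omega
    have h4 : ((2 : Nat) ^ PySem.Int.bitLength (K - 1) : Int) = (2 : Int) ^ PySem.Int.bitLength (K - 1) := by
      push_cast; ring
    omega

lemma pvS_lt (K : Int) (i : Nat) (hi : i < pvS K) : (2 : Int) ^ i < K := by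
  unfold pvS at hi
  split at hi
  · omega
  · rename_i h
    have h1 := PySem.Int.two_pow_bitLength_le (K - 1) (by omega)
    have h2 : (2 : Nat) ^ i ≤ 2 ^ (PySem.Int.bitLength (K - 1) - 1) :=
      Nat.pow_le_pow_right (by norm_num) (by omega)
    have h3 : (K - 1).natAbs = (K - 1).toNat := by omega
    have h4 : ((2 : Nat) ^ i : Int) = (2 : Int) ^ i := by push_cast; ring
    omega

lemma pvLoopK_eq (K : Int) : ∀ (f i : Nat), pvS K ≤ i + f → i ≤ pvS K →
    pvLoopK f K ((2 : Int) ^ i) = (2 : Int) ^ pvS K := by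
  intro f
  induction f with
  | zero =>
    intro i h1 h2
    have : i = pvS K := by omega
    simp [pvLoopK, this]
  | succ f ih =>
    intro i h1 h2
    rcases Nat.lt_or_ge i (pvS K) with hlt | hge
    · have hcond : (2 : Int) ^ i < K := pvS_lt K i hlt
      have : (2 : Int) * 2 ^ i = 2 ^ (i + 1) := by ring
      simp only [pvLoopK, if_pos hcond, this]
      exact ih (i + 1) (by omega) (by omega)
    · have : i = pvS K := by omega
      subst this
      have hcond : ¬ ((2 : Int) ^ pvS K < K) := by have := pvS_ge K; omega
      simp [pvLoopK, hcond]

lemma pow_lt_pow_int (a b : Nat) (h : a < b) : (2 : Int) ^ a < (2 : Int) ^ b := by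
  have := Nat.pow_lt_pow_right (a := 2) (by norm_num) h
  have h4 : ∀ n : Nat, ((2 : Nat) ^ n : Int) = (2 : Int) ^ n := by intro n; push_cast; ring
  have := h4 a; have := h4 b
  omega

lemma pvLoopR_eq (s : Nat) : ∀ (f i : Nat), (s + 1) / 2 ≤ i + f → i ≤ (s + 1) / 2 →
    pvLoopR f ((2 : Int) ^ s) ((2 : Int) ^ i) = (2 : Int) ^ ((s + 1) / 2) := by
  intro f
  induction f with
  | zero =>
    intro i h1 h2
    have : i = (s + 1) / 2 := by omega
    simp [pvLoopR, this]
  | succ f ih =>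
    intro i h1 h2
    rcases Nat.lt_or_ge i ((s + 1) / 2) with hlt | hge
    · have hcond : (2 : Int) ^ i * 2 ^ i < 2 ^ s := by
        have : (2 : Int) ^ i * 2 ^ i = 2 ^ (i + i) := by rw [pow_add]
        rw [this]
        exact pow_lt_pow_int _ _ (by omega)
      have hstep : (2 : Int) * 2 ^ i = 2 ^ (i + 1) := by ring
      simp only [pvLoopR, if_pos hcond, hstep]
      exact ih (i + 1) (by omega) (by omega)
    · have : i = (s + 1) / 2 := by omega
      subst this
      have hcond : ¬ ((2 : Int) ^ ((s + 1) / 2) * 2 ^ ((s + 1) / 2) < 2 ^ s) := by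
        have h1 : (2 : Int) ^ ((s + 1) / 2) * 2 ^ ((s + 1) / 2) = 2 ^ ((s + 1) / 2 + (s + 1) / 2) := by
          rw [pow_add]
        rw [h1]
        rcases Nat.lt_or_ge s ((s + 1) / 2 + (s + 1) / 2) with h | h
        · have := pow_lt_pow_int s _ h; omega
        · have he : s = (s + 1) / 2 + (s + 1) / 2 := by omega
          rw [← he]; omega
      simp [pvLoopR, hcond]

lemma bitLength_two_pow (s : Nat) : PySem.Int.bitLength ((2 : Int) ^ s) = s + 1 := by
  set b := PySem.Int.bitLength ((2 : Int) ^ s) with hb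
  have hpow : ((2 : Int) ^ s).natAbs = 2 ^ s := by
    have : (0 : Int) < 2 ^ s := by positivity
    have h4 : ((2 : Nat) ^ s : Int) = (2 : Int) ^ s := by push_cast; ring
    omega
  have h1 := PySem.Int.lt_two_pow_bitLength ((2 : Int) ^ s)
  rw [hpow] at h1
  have h2 := PySem.Int.two_pow_bitLength_le ((2 : Int) ^ s) (by positivity)
  rw [hpow] at h2
  have hs_lt : s < b := (Nat.pow_lt_pow_iff_right (by norm_num)).mp h1
  have hb1 : b - 1 ≤ s := (Nat.pow_le_pow_iff_right (by norm_num)).mp h2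
  omega

lemma alt_eq (K : Int) (n_slots : Int) :
    pick_K_prime_split_py_alt K n_slots =
      ((2 : Int) ^ pvS K, (2 : Int) ^ ((pvS K + 1) / 2),
        PySem.Int.floordiv ((2 : Int) ^ pvS K) ((2 : Int) ^ ((pvS K + 1) / 2))) := by
  unfold pick_K_prime_split_py_alt pvS
  split
  · norm_num [PySem.Int.bitLength]
    decide
  · have hshift : ∀ k : Nat, (1 : Int) <<< k = 2 ^ k := by
      intro k
      rw [Int.shiftLeft_eq]
      ring
    simp only [hshift, bitLength_two_pow, Nat.add_sub_cancel]

-- ===== VERDICT (by name: the statement is the Claim_ definition above) =====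
theorem pick_K_prime_split_py_spec : Claim_equal_pick_K_prime_split_py := by
  intro K n_slots hDom hPre
  unfold Spec_pick_K_prime_split_py
  rw [alt_eq]
  unfold pick_K_prime_split_py
  have hDom' : K ≤ 2147483648 := by
    unfold Dom_pick_K_prime_split_py pvDomInt at hDom
    simp at hDom
    omega
  have hs := pvS_upper K hDom'
  have hK : pvLoopK 64 K 1 = (2 : Int) ^ pvS K := by
    have := pvLoopK_eq K 64 0 (by omega) (by omega)
    simpa using this
  have hR : pvLoopR 64 ((2 : Int) ^ pvS K) 1 = (2 : Int) ^ ((pvS K + 1) / 2) := by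
    have := pvLoopR_eq (pvS K) 64 0 (by omega) (by omega)
    simpa using this
  simp only [hK, hR]
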